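-- pv_equiv track=rewrite | github.com/reshmiibon/2xc3_lab1 | code.py | are_valid_groups
-- ===== SOURCE A (Python) =====
-- def is_member_in_a_group(student_no, lst_groups):
--
--     count = 0
--
--     for i in range(len(lst_groups)):
--         for j in range(len(lst_groups[i])):
--             if (lst_groups[i][j] == student_no):
--                 count += 1
--
--     if (count == 1):
--         ans = True
--     else:
--         ans = False
--
--     return ans
--
-- def are_valid_groupsizes(lst_groups):
--
--     bool_val = True
--
--     for i in range(len(lst_groups)):
--         if (len(lst_groups[i]) != 2 and len(lst_groups[i]) != 3):
--             bool_val = False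
--
--     return bool_val
--
-- def are_valid_groups(lst_student_no, lst_groups):
--
--     ans = True
--     no_of_student = len(lst_student_no)
--     no_of_student_in_groups = 0
--     bool_lst = []
--
--     if (are_valid_groupsizes(lst_groups) == False):
--         return False
--
--     for x in range(len(lst_student_no)):
--         student_no = lst_student_no[x]
--         bool_lst.append(is_member_in_a_group(student_no, lst_groups))
--
--     for i in range(len(lst_groups)):
--             for j in range(len(lst_groups[i])):
--                 no_of_student_in_groups += 1
--
--     if (no_of_student != no_of_student_in_groups):
--         return False
--
--     for i in range(len(bool_lst)):
--         if (bool_lst[i] == False):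
--             ans = False
--
--     return ans
-- ===== SOURCE B (Python) =====
-- def are_valid_groups(lst_student_no, lst_groups):
--     if any(len(g) != 2 and len(g) != 3 for g in lst_groups):
--         return False
--     counts = {}
--     for g in lst_groups:
--         for s in g:
--             counts[s] = counts.get(s, 0) + 1
--     if len(lst_student_no) != sum(len(g) for g in lst_groups):
--         return False
--     return all(counts.get(s, 0) == 1 for s in lst_student_no)
-- ===== Notes on version B (the rewrite author's own statement) =====
-- stated objective: alternative
-- what changed: Replaced the per-student rescan of all groups (is_member_in_a_group) with one dict of member counts built in a single pass over the groups, then a lookup per student.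
import Mathlib
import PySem

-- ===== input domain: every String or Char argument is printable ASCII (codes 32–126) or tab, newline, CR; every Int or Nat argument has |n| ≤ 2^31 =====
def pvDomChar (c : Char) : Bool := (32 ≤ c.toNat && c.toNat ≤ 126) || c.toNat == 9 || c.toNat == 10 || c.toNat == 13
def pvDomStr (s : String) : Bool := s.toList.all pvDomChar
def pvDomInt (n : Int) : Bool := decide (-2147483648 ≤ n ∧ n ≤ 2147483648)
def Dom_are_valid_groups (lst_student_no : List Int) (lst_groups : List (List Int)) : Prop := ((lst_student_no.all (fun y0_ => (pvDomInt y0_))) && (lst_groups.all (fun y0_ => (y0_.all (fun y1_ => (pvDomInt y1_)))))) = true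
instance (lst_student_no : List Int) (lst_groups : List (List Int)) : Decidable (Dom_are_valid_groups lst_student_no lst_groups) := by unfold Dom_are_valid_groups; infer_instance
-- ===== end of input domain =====

-- B replaces the per-student rescan of all groups with one membership-count dict built in a single pass over the groups.

-- ===== PORT A =====
def is_member_in_a_group (student_no : Int) (lst_groups : List (List Int)) : Bool :=
  let count : Int :=
    (PySem.List.pyRange 0 (lst_groups.length : Int) 1).foldl (fun c i =>
      (PySem.List.pyRange 0 ((PySem.List.pyGetD lst_groups i []).length : Int) 1).foldl (fun c j =>
        if PySem.List.pyGetD (PySem.List.pyGetD lst_groups i []) j 0 == student_no then c + 1 else c) c) 0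
  if count == 1 then true else false

def are_valid_groupsizes (lst_groups : List (List Int)) : Bool :=
  (PySem.List.pyRange 0 (lst_groups.length : Int) 1).foldl (fun b i =>
    if (PySem.List.pyGetD lst_groups i []).length ≠ 2 ∧ (PySem.List.pyGetD lst_groups i []).length ≠ 3 then false else b) true

def are_valid_groups (lst_student_no : List Int) (lst_groups : List (List Int)) : Bool :=
  if are_valid_groupsizes lst_groups == false then false
  else
    let bool_lst : List Bool :=
      (PySem.List.pyRange 0 (lst_student_no.length : Int) 1).foldl (fun acc x =>
        acc ++ [is_member_in_a_group (PySem.List.pyGetD lst_student_no x 0) lst_groups]) []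
    let no_of_student_in_groups : Int :=
      (PySem.List.pyRange 0 (lst_groups.length : Int) 1).foldl (fun n i =>
        (PySem.List.pyRange 0 ((PySem.List.pyGetD lst_groups i []).length : Int) 1).foldl (fun n _ => n + 1) n) 0
    if (lst_student_no.length : Int) ≠ no_of_student_in_groups then false
    else
      (PySem.List.pyRange 0 (bool_lst.length : Int) 1).foldl (fun a i =>
        if PySem.List.pyGetD bool_lst i true == false then false else a) true

-- ===== PORT B =====
def are_valid_groups_alt (lst_student_no : List Int) (lst_groups : List (List Int)) : Bool :=
  if lst_groups.any (fun g => g.length ≠ 2 && g.length ≠ 3) then false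
  else
    let counts : PySem.Dict Int Int :=
      lst_groups.foldl (fun d g => g.foldl (fun d s => d.modify s 0 (· + 1)) d) PySem.Dict.empty
    if (lst_student_no.length : Int) ≠ (lst_groups.map (fun g => (g.length : Int))).sum then false
    else lst_student_no.all (fun s => counts.getD s 0 == 1)

-- ===== PRECONDITION & SPEC =====
def Spec_are_valid_groups (lst_student_no : List Int) (lst_groups : List (List Int)) (out : Bool) : Prop := out = are_valid_groups_alt lst_student_no lst_groups
instance (lst_student_no : List Int) (lst_groups : List (List Int)) (out : Bool) : Decidable (Spec_are_valid_groups lst_student_no lst_groups out) := by unfold Spec_are_valid_groups; infer_instance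

-- ===== CLAIM (what is proved, stated in full; the proofs are below) =====
def Claim_equal_are_valid_groups : Prop := ∀ (lst_student_no : List Int) (lst_groups : List (List Int)), Dom_are_valid_groups lst_student_no lst_groups → Spec_are_valid_groups lst_student_no lst_groups (are_valid_groups lst_student_no lst_groups)

-- ===== LEMMAS AND PROOFS =====

-- A's is_member count is the number of occurrences of the student in the flattened groups.
theorem is_member_eq_count (s : Int) (gs : List (List Int)) :
    is_member_in_a_group s gs = (gs.flatten.count s == 1) := by
  unfold is_member_in_a_group
  rw [PySem.List.foldl_pyRange_zero_pyGetD' gs []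
    (fun c g => (PySem.List.pyRange 0 (g.length : Int) 1).foldl (fun c j =>
      if PySem.List.pyGetD g j 0 == s then c + 1 else c) c) 0]
  have h : ∀ (l : List (List Int)) (c : Int),
      l.foldl (fun c g => (PySem.List.pyRange 0 (g.length : Int) 1).foldl (fun c j =>
        if PySem.List.pyGetD g j 0 == s then c + 1 else c) c) c = c + (l.flatten.count s : Int) := by
    intro l
    induction l with
    | nil => simp
    | cons g t ih =>
      intro c
      simp only [List.foldl_cons, ih, List.flatten_cons, List.count_append]
      rw [PySem.List.foldl_pyRange_zero_pyGetD' g 0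
        (fun c x => if x == s then c + 1 else c) c, PySem.List.foldl_beq_add_one]
      push_cast; ring
  rw [h]
  simp only [zero_add]
  by_cases hc : gs.flatten.count s = 1 <;> simp [hc]

-- A's size check equals B's.
theorem sizes_eq (gs : List (List Int)) :
    are_valid_groupsizes gs = !(gs.any (fun g => g.length ≠ 2 && g.length ≠ 3)) := by
  unfold are_valid_groupsizes
  rw [PySem.List.foldl_pyRange_zero_pyGetD' gs []
    (fun b g => if g.length ≠ 2 ∧ g.length ≠ 3 then false else b) true]
  have : ∀ (l : List (List Int)) (b : Bool),
      l.foldl (fun b g => if g.length ≠ 2 ∧ g.length ≠ 3 then false else b) b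
        = (b && !(l.any (fun g => g.length ≠ 2 && g.length ≠ 3))) := by
    intro l
    induction l with
    | nil => simp
    | cons g t ih =>
      intro b
      simp only [List.foldl_cons, ih, List.any_cons]
      by_cases h2 : g.length = 2 <;> by_cases h3 : g.length = 3 <;> simp [h2, h3]
  rw [this]; simp

-- A's member-count total equals the flattened length.
theorem total_eq (gs : List (List Int)) :
    (PySem.List.pyRange 0 (gs.length : Int) 1).foldl (fun n i =>
        (PySem.List.pyRange 0 ((PySem.List.pyGetD gs i []).length : Int) 1).foldl (fun n _ => n + 1) n) 0
      = (gs.map (fun g => (g.length : Int))).sum := by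
  rw [PySem.List.foldl_pyRange_zero_pyGetD' gs []
    (fun n g => (PySem.List.pyRange 0 (g.length : Int) 1).foldl (fun n _ => n + 1) n) 0]
  have : ∀ (l : List (List Int)) (n : Int),
      l.foldl (fun n g => (PySem.List.pyRange 0 (g.length : Int) 1).foldl (fun n _ => n + 1) n) n
        = n + (l.map (fun g => (g.length : Int))).sum := by
    intro l
    induction l with
    | nil => simp
    | cons g t ih =>
      intro n
      simp only [List.foldl_cons, ih, List.map_cons, List.sum_cons]
      have : (PySem.List.pyRange 0 (g.length : Int) 1).foldl (fun n _ => n + 1) n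
          = n + (g.length : Int) := by
        have hlen := PySem.List.length_pyRange_one (a := 0) (b := (g.length : Int))
        generalize PySem.List.pyRange 0 (g.length : Int) 1 = r at hlen
        have : ∀ (r : List Int) (n : Int), r.foldl (fun n _ => n + 1) n = n + (r.length : Int) := by
          intro r; induction r with
          | nil => simp
          | cons x t ih => intro n; simp only [List.foldl_cons, ih, List.length_cons]; push_cast; ring
        rw [this, hlen]; simp
      rw [this]; ring
  rw [this]; simp

-- B's nested dict-building loop is Counter of the flattened groups.
theorem counts_eq (gs : List (List Int)) :
    gs.foldl (fun d g => g.foldl (fun d s => d.modify s 0 (· + 1)) d) PySem.Dict.empty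
      = PySem.Dict.counter gs.flatten := by
  rw [PySem.Dict.counter_eq_foldl, ← List.foldl_flatten]

-- The final bool_lst scan of A equals an 'all' over the students.
theorem final_scan_eq (students : List Int) (gs : List (List Int)) :
    (PySem.List.pyRange 0
        (((PySem.List.pyRange 0 (students.length : Int) 1).foldl (fun acc x =>
            acc ++ [is_member_in_a_group (PySem.List.pyGetD students x 0) gs]) []).length : Int) 1).foldl
      (fun a i =>
        if PySem.List.pyGetD
            ((PySem.List.pyRange 0 (students.length : Int) 1).foldl (fun acc x =>
              acc ++ [is_member_in_a_group (PySem.List.pyGetD students x 0) gs]) []) i true == false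
        then false else a) true
      = students.all (fun s => gs.flatten.count s == 1) := by
  have hb : (PySem.List.pyRange 0 (students.length : Int) 1).foldl (fun acc x =>
        acc ++ [is_member_in_a_group (PySem.List.pyGetD students x 0) gs]) []
      = students.map (fun s => is_member_in_a_group s gs) := by
    rw [PySem.List.foldl_pyRange_zero_pyGetD' students 0
      (fun acc s => acc ++ [is_member_in_a_group s gs]) []]
    rw [PySem.List.foldl_append_singleton_eq_map]; simp
  rw [hb]
  rw [PySem.List.foldl_pyRange_zero_pyGetD' (students.map (fun s => is_member_in_a_group s gs)) true
    (fun a b => if b == false then false else a) true]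
  have : ∀ (l : List Bool) (a : Bool),
      l.foldl (fun a b => if b == false then false else a) a = (a && l.all id) := by
    intro l
    induction l with
    | nil => simp
    | cons b t ih => intro a; rw [List.foldl_cons, ih]; cases b <;> cases a <;> simp
  rw [this]
  simp [List.all_map, is_member_eq_count]

-- ===== VERDICT (by name: the statement is the Claim_ definition above) =====
theorem are_valid_groups_spec : Claim_equal_are_valid_groups := by
  intro students gs _
  unfold Spec_are_valid_groups are_valid_groups are_valid_groups_alt
  rw [sizes_eq]
  by_cases hs : gs.any (fun g => g.length ≠ 2 && g.length ≠ 3) = true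
  · rw [hs]; rfl
  · have hs' : gs.any (fun g => g.length ≠ 2 && g.length ≠ 3) = false := by
      revert hs; cases gs.any (fun g => g.length ≠ 2 && g.length ≠ 3) <;> simp
    rw [hs']
    simp only [Bool.not_false, Bool.false_eq_true, if_false]
    rw [total_eq]
    simp only [counts_eq]
    by_cases ht : (students.length : Int) = (gs.map (fun g => (g.length : Int))).sum
    · rw [if_neg (not_not_intro ht), if_neg (not_not_intro ht)]
      rw [final_scan_eq students gs]
      simp only [PySem.Dict.getD_counter]
      have hpt : ∀ n : Nat, (n == 1) = ((n : Int) == 1) := by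
        intro n; by_cases h : n = 1 <;> simp [h]
      simp only [hpt]
      simp
    · rw [if_pos ht, if_pos ht]; simp
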